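-- pv_equiv track=rewrite | github.com/razinc/fplysis | fpl_custom_functions.py | get_previous_three_gameweeks
-- ===== SOURCE A (Python) =====
-- def get_previous_three_gameweeks(current_gameweek):
--     previous_three_gameweeks = [
--         current_gameweek,
--         current_gameweek - 1,
--         current_gameweek - 2,
--     ]
--     previous_three_gameweeks = [gw for gw in previous_three_gameweeks if gw > 0]
--     previous_three_gameweeks.reverse()
--     return previous_three_gameweeks
-- ===== SOURCE B (Python) =====
-- def get_previous_three_gameweeks(current_gameweek):
--     def walk_back(gw, steps):
--         if steps == 0 or gw <= 0:
--             return []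
--         return walk_back(gw - 1, steps - 1) + [gw]
--     return walk_back(current_gameweek, 3)
-- ===== Notes on version B (the rewrite author's own statement) =====
-- stated objective: alternative
-- what changed: B computes the window by recursion: it walks backwards from the current gameweek with a step budget of 3, stopping at zero budget or a non-positive gameweek, appending each visited week after the recursive call so the list comes out ascending - no fixed candidate list, no filter pass, no in-place reverse.
import Mathlib
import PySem

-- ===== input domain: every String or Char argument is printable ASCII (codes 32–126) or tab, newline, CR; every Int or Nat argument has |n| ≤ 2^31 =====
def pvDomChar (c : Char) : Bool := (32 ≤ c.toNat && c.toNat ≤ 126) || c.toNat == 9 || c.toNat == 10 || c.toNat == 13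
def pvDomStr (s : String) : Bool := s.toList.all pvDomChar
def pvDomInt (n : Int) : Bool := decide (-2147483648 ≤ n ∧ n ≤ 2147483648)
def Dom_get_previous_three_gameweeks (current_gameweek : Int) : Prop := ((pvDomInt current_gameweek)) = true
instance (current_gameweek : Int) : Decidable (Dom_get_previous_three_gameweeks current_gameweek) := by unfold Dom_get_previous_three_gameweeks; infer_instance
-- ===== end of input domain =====

-- B replaces A's build-filter-reverse of a fixed 3-element list by a recursive
-- backward walk with a step budget (alternative decomposition); return values
-- proved equal on all Int inputs.


-- ===== PORT A =====
def get_previous_three_gameweeks (current_gameweek : Int) : List Int :=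
  let previous_three_gameweeks : List Int :=
    [current_gameweek, current_gameweek - 1, current_gameweek - 2]
  let previous_three_gameweeks := previous_three_gameweeks.filter (fun gw => gw > 0)
  let previous_three_gameweeks := previous_three_gameweeks.reverse
  previous_three_gameweeks

-- ===== PORT B =====
-- walk_back(gw, steps): recursion on the step budget, append gw after the recursive call
def pvWalkBack (gw : Int) : Nat → List Int
  | 0 => []
  | steps + 1 => if gw ≤ 0 then [] else pvWalkBack (gw - 1) steps ++ [gw]

def get_previous_three_gameweeks_alt (current_gameweek : Int) : List Int :=
  pvWalkBack current_gameweek 3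

-- ===== PRECONDITION & SPEC =====
def Spec_get_previous_three_gameweeks (current_gameweek : Int) (out : List Int) : Prop := out = get_previous_three_gameweeks_alt current_gameweek
instance (current_gameweek : Int) (out : List Int) : Decidable (Spec_get_previous_three_gameweeks current_gameweek out) := by unfold Spec_get_previous_three_gameweeks; infer_instance

-- ===== CLAIM (what is proved, stated in full; the proofs are below) =====
def Claim_equal_get_previous_three_gameweeks : Prop := ∀ (current_gameweek : Int), Dom_get_previous_three_gameweeks current_gameweek → Spec_get_previous_three_gameweeks current_gameweek (get_previous_three_gameweeks current_gameweek)

-- ===== LEMMAS AND PROOFS =====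

-- ===== VERDICT (by name: the statement is the Claim_ definition above) =====
theorem get_previous_three_gameweeks_spec : Claim_equal_get_previous_three_gameweeks := by
  intro gw _
  unfold Spec_get_previous_three_gameweeks get_previous_three_gameweeks
    get_previous_three_gameweeks_alt
  simp only [pvWalkBack]
  rcases Int.lt_or_le gw 1 with h | h
  · -- gw ≤ 0 : filter removes everything, walk stops immediately
    rw [if_pos (by omega)]
    simp only [List.filter,
      decide_eq_false (show ¬(gw > 0) by omega),
      decide_eq_false (show ¬(gw - 1 > 0) by omega),
      decide_eq_false (show ¬(gw - 2 > 0) by omega), List.reverse_nil]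
  · rcases Int.lt_or_le gw 2 with h2 | h2
    · -- gw = 1
      have hgw : gw = 1 := by omega
      subst hgw; decide
    · rcases Int.lt_or_le gw 3 with h3 | h3
      · -- gw = 2
        have hgw : gw = 2 := by omega
        subst hgw; decide
      · -- gw ≥ 3 : all three steps taken, all three survive the filter
        rw [if_neg (by omega), if_neg (by omega), if_neg (by omega)]
        simp only [List.filter,
          decide_eq_true (show gw > 0 by omega),
          decide_eq_true (show gw - 1 > 0 by omega),
          decide_eq_true (show gw - 2 > 0 by omega)]
        simp
        omega
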